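-- pv_equiv track=rewrite | github.com/oxytocin/Doc-Comments-Conversion | docx_to_text.py | find_unescaped
-- ===== SOURCE A (Python) =====
-- def count_preceeding_backslashes(text: str, idx: int) -> int:
--     """Count backslashes immediately preceeding char at idx"""
--     backslashes_encountered = 0
--     i = 0
--     while True:
--         i += 1
--         if idx - i < 0:
--             return backslashes_encountered
--         try:
--             char = text[idx-i]
--         except IndexError:
--             return backslashes_encountered
--         if char != "\\":
--             return backslashes_encountered
--         backslashes_encountered += 1
--
-- def find_unescaped(text: str, target: str, offset=0, reverse=False) -> int:
--     """Find first occurrence of str NOT escaped by backslash"""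
--     if not reverse:
--         idx = text.index(target, offset)
--     else:
--         idx = text[:offset].rindex(target)
--     if count_preceeding_backslashes(text, idx) % 2 != 0:
--         if not reverse:
--             return find_unescaped(text, target, idx+1, reverse=reverse)
--         else:
--             return find_unescaped(text, target, idx, reverse=reverse)
--     return idx
-- ===== SOURCE B (Python) =====
-- def find_unescaped(text: str, target: str, offset=0, reverse=False) -> int:
--     """Find first (or last, with reverse=True) occurrence of target not escaped
--     by backslashes: one pass precomputes the parity of the backslash run before
--     every position, then a single direct scan picks the answer."""
--     n = len(text)
--     m = len(target)
--     # parity[i] = parity of the run of backslashes immediately preceding index i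
--     parity = [0] * (n + 1)
--     run = 0
--     for i, ch in enumerate(text):
--         parity[i] = run & 1
--         run = run + 1 if ch == "\\" else 0
--     parity[n] = run & 1
--     if not reverse:
--         start = offset + n if offset < 0 else offset
--         start = max(start, 0)
--         for i in range(start, n - m + 1):
--             if text.startswith(target, i) and parity[i] == 0:
--                 return i
--     else:
--         end = offset + n if offset < 0 else offset
--         end = min(max(end, 0), n)
--         for i in range(end - m, -1, -1):
--             if text.startswith(target, i) and parity[i] == 0:
--                 return i
--     raise ValueError("substring not found")
-- ===== Notes on version B (the rewrite author's own statement) =====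
-- stated objective: alternative
-- what changed: A repeatedly calls index/rindex and recounts preceding backslashes recursively at each hit; B precomputes the parity of the backslash run before every position in one pass and then does a single direct scan over candidate positions (forward or backward) picking the first match with even parity.
-- outside the precondition, e.g. on find_unescaped('\\\\a\\\\\\aa', '\\\\', 9, True): A returns 0, B returns 3; on find_unescaped('\\\\\\\\a\\\\\\', '\\\\', 8, True): A returns 2, B returns 5
import Mathlib
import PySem

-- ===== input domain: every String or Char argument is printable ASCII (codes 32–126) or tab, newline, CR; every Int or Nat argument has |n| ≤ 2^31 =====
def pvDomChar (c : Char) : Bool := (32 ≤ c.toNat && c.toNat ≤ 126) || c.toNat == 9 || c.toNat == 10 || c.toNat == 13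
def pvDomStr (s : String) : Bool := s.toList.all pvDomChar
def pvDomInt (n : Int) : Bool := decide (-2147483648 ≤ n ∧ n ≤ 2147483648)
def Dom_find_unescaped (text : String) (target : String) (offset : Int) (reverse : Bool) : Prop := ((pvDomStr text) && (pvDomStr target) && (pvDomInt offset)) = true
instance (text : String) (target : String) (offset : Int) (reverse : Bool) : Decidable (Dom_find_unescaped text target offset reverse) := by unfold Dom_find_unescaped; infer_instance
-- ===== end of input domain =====

-- B replaces A's recursive index/rindex-and-recount search by one parity precomputation
-- plus a single direct scan over candidate positions (objective: alternative, not faster).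

-- ===== PORT A =====
-- port of count_preceeding_backslashes's 'while True' loop; the Python body first does
-- 'i += 1' and then tests, so the initial call is made with i = 1.
-- 'try: text[idx-i] except IndexError' is PySem.List.pyGet? (none = IndexError);
-- idx - i ≥ 0 is already ensured by the preceding branch, as in the Python.
def cpbLoop (s : List Char) (idx : Int) (i : Int) (acc : Int) : Int :=
  if idx - i < 0 then acc
  else
    match PySem.List.pyGet? s (idx - i) with
    | none => acc
    | some c => if c ≠ '\\' then acc else cpbLoop s idx (i + 1) (acc + 1)
termination_by (idx - i + 1).toNat
decreasing_by simp_wf; omega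

-- port of find_unescaped's recursion, fuelled: the Python recursion makes at most
-- text length + 1 nested calls on every input on which it returns (proved below via
-- the main lemmas), so fuel = length + 2 never runs out inside Pre_; fuel 0 / the
-- ValueError of index/rindex (the -1 branch) are only reached outside Pre_.
def fuLoop (fuel : Nat) (s t : List Char) (offset : Int) (reverse : Bool) : Int :=
  match fuel with
  | 0 => -2
  | fuel + 1 =>
    let idx : Int :=
      if !reverse then PySem.Chars.findFrom s t offset none   -- text.index(target, offset)
      else PySem.Chars.rfind (PySem.List.slice s none (some offset)) t  -- text[:offset].rindex(target)
    if idx = -1 then -1  -- ValueError propagates in Python: outside Pre_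
    else if cpbLoop s idx 1 0 % 2 ≠ 0 then
      if !reverse then fuLoop fuel s t (idx + 1) reverse
      else fuLoop fuel s t idx reverse
    else idx

def find_unescaped (text : String) (target : String) (offset : Int) (reverse : Bool) : Int :=
  fuLoop (text.toList.length + 2) text.toList target.toList offset reverse

-- ===== PORT B =====
-- parity list of Source B: parityAux s run = [parity of the backslash run just before i | i = 0..len s]
def parityAux (s : List Char) (run : Nat) : List Nat :=
  match s with
  | [] => [run % 2]
  | c :: rest => (run % 2) :: parityAux rest (if c == '\\' then run + 1 else 0)

-- loop-body test of Source B: text.startswith(target, i) and parity[i] == 0  (0 ≤ i, exact)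
def bPred (s t : List Char) (i : Nat) : Bool :=
  PySem.Chars.startswith (s.drop i) t && ((parityAux s 0).getD i 1 == 0)

-- Source B forward loop 'for i in range(start, n - m + 1)'
def bFwd (s t : List Char) (start : Nat) : Int :=
  match (List.range' start (s.length + 1 - t.length - start)).find? (bPred s t) with
  | some i => (i : Int)
  | none => -1   -- raise ValueError: outside Pre_

-- Source B backward loop 'for i in range(end - m, -1, -1)'
def bRev (s t : List Char) (e : Nat) : Int :=
  match ((List.range' 0 (e + 1 - t.length)).reverse.find? (bPred s t)) with
  | some i => (i : Int)
  | none => -1   -- raise ValueError: outside Pre_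

def find_unescaped_alt (text : String) (target : String) (offset : Int) (reverse : Bool) : Int :=
  let s := text.toList
  let t := target.toList
  if reverse then
    -- end = min(max(offset + n if offset < 0 else offset, 0), n)
    bRev s t (((min (max (if offset < 0 then offset + s.length else offset) 0) s.length)).toNat)
  else
    -- start = max(offset + n if offset < 0 else offset, 0)
    bFwd s t ((max (if offset < 0 then offset + s.length else offset) 0).toNat)

-- ===== PRECONDITION & SPEC =====
-- length of the backslash run immediately before position i (a closed-form measure on the input)
def bsRun (s : List Char) (i : Nat) : Nat :=
  ((s.take i).reverse.takeWhile (fun c => c == '\\')).length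

-- Pre_ excludes the inputs on which A raises (ValueError when no unescaped occurrence is
-- reachable, unbounded recursion for an odd-escaped empty target in reverse) and, in
-- addition, reverse searches in which an occurrence of the target overlaps a more
-- escaped occurrence: there A's shrinking-prefix rindex skips matches that B's full
-- scan sees, and which of two overlapping matches should count is a corner no caller
-- specifies (see cites in the claim).
def Pre_find_unescaped (text : String) (target : String) (offset : Int) (reverse : Bool) : Prop :=
  let s := text.toList
  let t := target.toList
  let n := s.length
  let m := t.length
  if reverse then
    let e := PySem.List.clampIdx n offset
    if m = 0 then bsRun s e % 2 = 0
    else ∃ i ∈ List.range (n + 1), i + m ≤ e ∧ t <+: s.drop i ∧ bsRun s i % 2 = 0 ∧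
      ∀ j ∈ List.range (n + 1), i < j → t <+: s.drop j → j + m ≤ e →
        (bsRun s j % 2 = 1 ∧ i + m ≤ j)
  else
    let k := (if offset < 0 then (offset + n).toNat else offset.toNat)
    ∃ i ∈ List.range (n + 1), k ≤ i ∧ i + m ≤ n ∧ t <+: s.drop i ∧ bsRun s i % 2 = 0

instance (text : String) (target : String) (offset : Int) (reverse : Bool) : Decidable (Pre_find_unescaped text target offset reverse) := by unfold Pre_find_unescaped; infer_instance

def pvWitness_find_unescaped : String × String × Int × Bool := ("a\\bc b", "b", 0, false)

def Spec_find_unescaped (text : String) (target : String) (offset : Int) (reverse : Bool) (out : Int) : Prop := out = find_unescaped_alt text target offset reverse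
instance (text : String) (target : String) (offset : Int) (reverse : Bool) (out : Int) : Decidable (Spec_find_unescaped text target offset reverse out) := by unfold Spec_find_unescaped; infer_instance

-- ===== CLAIM (what is proved, stated in full; the proofs are below) =====
def Claim_equal_find_unescaped : Prop := ∀ (text : String) (target : String) (offset : Int) (reverse : Bool), Dom_find_unescaped text target offset reverse → Pre_find_unescaped text target offset reverse → Spec_find_unescaped text target offset reverse (find_unescaped text target offset reverse)

-- ===== LEMMAS AND PROOFS =====

theorem take_succ_getElem (l : List Char) (j : Nat) (h : j < l.length) :
    l.take (j+1) = l.take j ++ [l[j]] := by rw [List.take_add_one]; simp [h]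

theorem tw_append_singleton (p : Char → Bool) (c : Char) :
    ∀ (l : List Char), (l ++ [c]).takeWhile p
      = if l.all p then l ++ (if p c then [c] else []) else l.takeWhile p := by
  intro l
  induction l with
  | nil => cases hc : p c <;> simp [List.takeWhile_cons, hc]
  | cons x xs ih =>
    by_cases hx : p x
    · simp [List.takeWhile_cons, hx, ih]
      split_ifs <;> simp
    · simp [List.takeWhile_cons, hx, List.all_cons]

theorem cpbLoop_go (s : List Char) (p : Nat) (hp : p ≤ s.length) :
    ∀ (j : Nat) (acc : Int), j < p →
      cpbLoop s (p : Int) ((p : Int) - j) acc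
        = acc + (((s.take (j + 1)).reverse.takeWhile (fun c => c == '\\')).length : Int) := by
  intro j
  induction j with
  | zero =>
    intro acc hj
    rw [cpbLoop]
    push_cast
    have h0 : 0 < s.length := by omega
    rw [if_neg (by omega)]
    have hgl : (p : Int) - ((p : Int) - 0) = ((0:Nat) : Int) := by push_cast; omega
    have hget : PySem.List.pyGet? s ((p : Int) - ((p : Int) - 0)) = some s[0] := by
      rw [hgl, PySem.List.pyGet?_natCast]
      simp [List.getElem?_eq_getElem h0]
    rw [hget]; dsimp only
    have htake : s.take (0+1) = [s[0]] := by
      have := take_succ_getElem s 0 h0; simpa using this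
    by_cases hc : s[0] = '\\'
    · rw [if_neg (by simp [hc])]
      rw [cpbLoop]
      rw [if_pos (by omega)]
      simp [htake, List.takeWhile, hc]
    · rw [if_pos (by simp [hc])]
      simp [htake, List.takeWhile, hc]
  | succ j ih =>
    intro acc hj
    rw [cpbLoop]
    push_cast
    rw [if_neg (by omega)]
    have hjl : j + 1 < s.length := by omega
    have hget : PySem.List.pyGet? s ((p : Int) - ((p : Int) - ((j:Int)+1))) = some s[j+1] := by
      have hgl : (p : Int) - ((p : Int) - ((j:Int)+1)) = (((j+1:Nat)) : Int) := by push_cast; omega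
      rw [hgl, PySem.List.pyGet?_natCast]
      simp [List.getElem?_eq_getElem hjl]
    rw [hget]; dsimp only
    have htake : s.take (j+1+1) = s.take (j+1) ++ [s[j+1]] := take_succ_getElem s (j+1) hjl
    by_cases hc : s[j+1] = '\\'
    · rw [if_neg (by simp [hc])]
      have harg : (p : Int) - ((j:Int)+1) + 1 = (p : Int) - (j:Int) := by omega
      rw [harg, ih (acc+1) (by omega)]
      rw [htake, List.reverse_append]
      simp [List.takeWhile_cons, hc]
      omega
    · rw [if_pos (by simp [hc])]
      rw [htake, List.reverse_append]
      simp [List.takeWhile_cons, hc]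

theorem cpb_eq (s : List Char) (p : Nat) (hp : p ≤ s.length) :
    cpbLoop s (p : Int) 1 0 = (bsRun s p : Int) := by
  rcases Nat.eq_zero_or_pos p with h0 | hpos
  · subst h0
    rw [cpbLoop, if_pos (by omega)]
    simp [bsRun]
  · have h1 : (1 : Int) = (p : Int) - (p - 1 : Nat) := by push_cast; omega
    rw [h1, cpbLoop_go s p hp (p-1) 0 (by omega)]
    have : p - 1 + 1 = p := by omega
    rw [this]
    simp [bsRun]

theorem parityAux_getD (s : List Char) :
    ∀ (run : Nat) (i : Nat), i ≤ s.length →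
      (parityAux s run).getD i 1
        = (((s.take i).reverse.takeWhile (fun c => c == '\\')).length
            + (if (s.take i).all (fun c => c == '\\') then run else 0)) % 2 := by
  induction s with
  | nil =>
    intro run i hi
    have : i = 0 := by simpa using hi
    subst this
    simp [parityAux]
  | cons c rest ih =>
    intro run i hi
    cases i with
    | zero => simp [parityAux]
    | succ i =>
      have hi' : i ≤ rest.length := by simpa using hi
      rw [parityAux]
      simp only [List.getD_cons_succ]
      rw [ih _ i hi']
      have htake : (c :: rest).take (i+1) = c :: rest.take i := by simp [List.take_cons]
      rw [htake]
      rw [show (c :: rest.take i).reverse = (rest.take i).reverse ++ [c] by simp]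
      rw [tw_append_singleton]
      rw [List.all_reverse]
      by_cases hall : (rest.take i).all (fun x => x == '\\') = true
      · have htw : ((rest.take i).reverse.takeWhile (fun x => x == '\\')) = (rest.take i).reverse := by
          apply List.takeWhile_eq_self_iff.mpr
          simpa [List.all_eq_true, List.all_reverse] using hall
        by_cases hc : c = '\\'
        · simp [hall, hc, htw, List.all_cons]
          omega
        · simp [hall, hc, htw, List.all_cons]
      · have hall2 : ((c :: rest.take i).all (fun x => x == '\\')) = false := by
          simp [List.all_cons]
          intro _
          simpa using hall
        simp [hall, hall2]

theorem parity_getD (s : List Char) (i : Nat) (hi : i ≤ s.length) :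
    (parityAux s 0).getD i 1 = bsRun s i % 2 := by
  rw [parityAux_getD s 0 i hi, bsRun]
  simp

-- generic find?-over-range' workhorses
theorem find?_range'_some (p : Nat → Bool) :
    ∀ (c k i : Nat), k ≤ i → i < k + c → p i = true → (∀ j, k ≤ j → j < i → p j = false) →
      (List.range' k c).find? p = some i := by
  intro c
  induction c with
  | zero => intro k i h1 h2; omega
  | succ c ih =>
    intro k i h1 h2 hp hmin
    rw [List.range'_succ, List.find?_cons]
    by_cases hk : k = i
    · subst hk; simp [hp]
    · have hpk : p k = false := hmin k le_rfl (by omega)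
      simp only [hpk]
      exact ih (k+1) i (by omega) (by omega) hp (fun j hj1 hj2 => hmin j (by omega) hj2)

theorem find?_range'_cut (p : Nat → Bool) :
    ∀ (d k c : Nat), d ≤ c → (∀ j, k ≤ j → j < k + d → p j = false) →
      (List.range' k c).find? p = (List.range' (k + d) (c - d)).find? p := by
  intro d
  induction d with
  | zero => intro k c _ _; simp
  | succ d ih =>
    intro k c hd hfail
    obtain ⟨c', rfl⟩ : ∃ c', c = c' + 1 := ⟨c - 1, by omega⟩
    rw [List.range'_succ, List.find?_cons, hfail k le_rfl (by omega)]
    have := ih (k+1) c' (by omega) (fun j h1 h2 => hfail j (by omega) (by omega))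
    simpa [Nat.add_right_comm, Nat.succ_sub_succ] using this

theorem find?_rev_range'_some (p : Nat → Bool) :
    ∀ (c i : Nat), i < c → p i = true → (∀ j, i < j → j < c → p j = false) →
      ((List.range' 0 c).reverse.find? p) = some i := by
  intro c
  induction c with
  | zero => omega
  | succ c ih =>
    intro i h1 hp hmax
    rw [List.range'_1_concat, List.reverse_append]
    simp only [List.reverse_singleton, List.singleton_append, List.find?_cons, Nat.zero_add]
    by_cases hc : i = c
    · subst hc; simp [hp]
    · have : p c = false := hmax c (by omega) (by omega)
      simp only [this]
      exact ih i (by omega) hp (fun j hj1 hj2 => hmax j hj1 (by omega))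

theorem find?_rev_range'_cut (p : Nat → Bool) :
    ∀ (c c' : Nat), c' ≤ c → (∀ j, c' ≤ j → j < c → p j = false) →
      ((List.range' 0 c).reverse.find? p) = ((List.range' 0 c').reverse.find? p) := by
  intro c
  induction c with
  | zero => intro c' h _; have : c' = 0 := by omega
            subst this; rfl
  | succ c ih =>
    intro c' h hfail
    by_cases hc : c' = c + 1
    · subst hc; rfl
    · rw [List.range'_1_concat, List.reverse_append]
      simp only [List.reverse_singleton, List.singleton_append, List.find?_cons, Nat.zero_add]
      rw [hfail c (by omega) (by omega)]
      exact ih c' (by omega) (fun j h1 h2 => hfail j h1 (by omega))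

theorem of_find?_rev_range' (p : Nat → Bool) :
    ∀ (c i : Nat), ((List.range' 0 c).reverse.find? p) = some i →
      i < c ∧ p i = true ∧ ∀ j, i < j → j < c → p j = false := by
  intro c
  induction c with
  | zero => intro i h; simp at h
  | succ c ih =>
    intro i h
    rw [List.range'_1_concat, List.reverse_append] at h
    simp only [List.reverse_singleton, List.singleton_append, List.find?_cons, Nat.zero_add] at h
    by_cases hpc : p c = true
    · rw [hpc] at h; simp at h
      subst h
      exact ⟨by omega, hpc, fun j h1 h2 => by omega⟩
    · rw [Bool.not_eq_true] at hpc
      rw [hpc] at h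
      obtain ⟨h1, h2, h3⟩ := ih i h
      refine ⟨by omega, h2, fun j hj1 hj2 => ?_⟩
      by_cases hj : j = c
      · subst hj; exact hpc
      · exact h3 j hj1 (by omega)

theorem rfind_go_eq (s' sub : List Char) :
    ∀ (j : Nat),
      PySem.Chars.rfind.go s' sub j
        = (match (List.range' 0 (j + 1)).reverse.find? (fun i => sub.isPrefixOf (s'.drop i)) with
           | some i => (i : Int)
           | none => -1) := by
  intro j
  induction j with
  | zero =>
    have h0 : PySem.Chars.rfind.go s' sub 0 = if sub.isPrefixOf s' then 0 else -1 := rfl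
    have h1 : (List.range' 0 1).reverse = [0] := rfl
    rw [h0, h1, List.find?_cons]
    cases h : sub.isPrefixOf (s'.drop 0) <;> simp_all
  | succ j ih =>
    have hs : PySem.Chars.rfind.go s' sub (j+1)
        = if sub.isPrefixOf (s'.drop (j+1)) then ((j+1 : Nat) : Int) else PySem.Chars.rfind.go s' sub j := rfl
    rw [hs]
    conv_rhs => rw [List.range'_1_concat]
    rw [List.reverse_append]
    simp only [List.reverse_singleton, List.singleton_append, List.find?_cons, Nat.zero_add]
    cases h : sub.isPrefixOf (s'.drop (j+1)) <;> simp [h, ih]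

theorem slice_to_clamp (s : List Char) (b : Int) :
    PySem.List.slice s none (some b) = s.take (PySem.List.clampIdx s.length b) := by
  show List.take (PySem.List.clampIdx s.length b - 0) (List.drop 0 s) = _
  simp

theorem findFrom_clamp (s t : List Char) (offset : Int) :
    PySem.Chars.findFrom s t offset none
      = PySem.Chars.findFrom s t (((if offset < 0 then (offset + s.length).toNat else offset.toNat) : Nat) : Int) none := by
  by_cases hneg : offset < 0
  · unfold PySem.Chars.findFrom
    dsimp only
    have hst : (if offset < 0 then (if offset + (s.length:Int) < 0 then 0 else offset + s.length) else offset)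
        = (((if offset < 0 then (offset + s.length).toNat else offset.toNat) : Nat) : Int) := by
      split_ifs <;> push_cast <;> omega
    have hst2 : (if (((if offset < 0 then (offset + s.length).toNat else offset.toNat) : Nat) : Int) < 0
          then (if (((if offset < 0 then (offset + s.length).toNat else offset.toNat) : Nat) : Int) + (s.length:Int) < 0 then 0 else (((if offset < 0 then (offset + s.length).toNat else offset.toNat) : Nat) : Int) + s.length)
          else (((if offset < 0 then (offset + s.length).toNat else offset.toNat) : Nat) : Int))
        = (((if offset < 0 then (offset + s.length).toNat else offset.toNat) : Nat) : Int) := by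
      split_ifs <;> push_cast <;> omega
    rw [hst, hst2]
  · have : offset = ((offset.toNat : Nat) : Int) := by omega
    rw [if_neg hneg]
    conv_lhs => rw [this]

-- the forward main induction
theorem fwdLoop (s t : List Char) :
    ∀ (fuel : Nat) (k : Nat),
      (∃ i, k ≤ i ∧ i + t.length ≤ s.length ∧ t <+: s.drop i ∧ bsRun s i % 2 = 0) →
      s.length + 1 - k < fuel →
      fuLoop fuel s t (k : Int) false = bFwd s t k := by
  intro fuel
  induction fuel with
  | zero => intro k _ hf; omega
  | succ fuel ih =>
    intro k hex hf
    obtain ⟨i0, hki, hfit, hpre, hev⟩ := hex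
    have hkn : k ≤ s.length := by omega
    rw [fuLoop]
    simp only [Bool.not_false, if_true]
    rw [PySem.Chars.findFrom_natCast s t k hkn]
    have hinf : t <:+: s.drop k := by
      have h1 : t <+: (s.drop k).drop (i0 - k) := by
        rw [List.drop_drop]
        have h2 : k + (i0 - k) = i0 := by omega
        rw [h2]
        exact hpre
      exact h1.isInfix.trans (List.drop_suffix (i0-k) (s.drop k)).isInfix
    have hfind : PySem.Chars.find (s.drop k) t ≠ -1 :=
      (PySem.Chars.find_ne_neg_one_iff (s.drop k) t).mpr hinf
    have hf0 : 0 ≤ PySem.Chars.find (s.drop k) t := by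
      have := PySem.Chars.neg_one_le_find (s.drop k) t
      omega
    obtain ⟨hpref, hmin⟩ := PySem.Chars.find_spec hf0
    set f := (PySem.Chars.find (s.drop k) t).toNat with hfdef
    set p := k + f with hpdef
    have hocc : t <+: s.drop p := by
      rw [List.drop_drop] at hpref
      exact hpref
    have hfitp : p + t.length ≤ s.length := by
      rcases Nat.eq_zero_or_pos t.length with hm0 | hm1
      · have hnil : t = [] := List.length_eq_zero_iff.mp hm0
        have : PySem.Chars.find (s.drop k) t = 0 := by rw [hnil]; exact PySem.Chars.find_nil _
        simp [hpdef, hfdef, this, hm0]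
        omega
      · have := hocc.length_le
        simp at this
        omega
    have hpn : p ≤ s.length := by omega
    have hminp : ∀ j, k ≤ j → j < p → ¬ t <+: s.drop j := by
      intro j hj1 hj2 hcon
      apply hmin (j - k) (by omega)
      rw [List.drop_drop]
      have h2 : k + (j - k) = j := by omega
      rwa [h2]
    have hidx : (k:Int) + PySem.Chars.find (s.drop k) t = ((p : Nat) : Int) := by
      push_cast
      omega
    rw [if_neg hfind, hidx]
    rw [if_neg (show ¬((p : Nat) : Int) = -1 from by omega)]
    rw [cpb_eq s p hpn]
    have hfailLow : ∀ j, k ≤ j → j < p → bPred s t j = false := by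
      intro j h1 h2
      have : PySem.Chars.startswith (s.drop j) t = false := by
        rw [← Bool.not_eq_true, PySem.Chars.startswith_iff]
        exact hminp j h1 h2
      simp [bPred, this]
    by_cases hevp : bsRun s p % 2 = 0
    · -- unescaped: both return p
      rw [if_neg (show ¬((bsRun s p : Int) % 2 ≠ 0) from by omega)]
      have hs1 : PySem.Chars.startswith (s.drop p) t = true := (PySem.Chars.startswith_iff _ _).mpr hocc
      have hgd : (parityAux s 0).getD p 1 = bsRun s p % 2 := parity_getD s p hpn
      have hptrue : bPred s t p = true := by
        simp only [bPred, hs1, Bool.true_and, hgd, hevp]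
        rfl
      have hsome : (List.range' k (s.length + 1 - t.length - k)).find? (bPred s t) = some p :=
        find?_range'_some (bPred s t) _ k p (by omega) (by omega) hptrue hfailLow
      rw [bFwd, hsome]
    · -- escaped at p: A recurses from p+1, B's scan skips [k, p]
      rw [if_pos (show ((bsRun s p : Int) % 2 ≠ 0) from by omega)]
      have hcast : ((p:Int) + 1) = (((p+1 : Nat)) : Int) := by push_cast; ring
      rw [hcast]
      have hex' : ∃ i, p + 1 ≤ i ∧ i + t.length ≤ s.length ∧ t <+: s.drop i ∧ bsRun s i % 2 = 0 := by
        refine ⟨i0, ?_, hfit, hpre, hev⟩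
        rcases Nat.lt_or_ge i0 (p+1) with hlt | hge
        · exfalso
          rcases Nat.lt_or_ge i0 p with hlt2 | hge2
          · exact hminp i0 hki hlt2 hpre
          · have : i0 = p := by omega
            rw [this] at hev
            omega
        · exact hge
      rw [ih (p+1) hex' (by omega)]
      -- bFwd s t (p+1) = bFwd s t k
      have hfail : ∀ j, k ≤ j → j < k + (p + 1 - k) → bPred s t j = false := by
        intro j h1 h2
        rcases Nat.lt_or_ge j p with hlt | hge
        · exact hfailLow j h1 hlt
        · have hj : j = p := by omega
          subst hj
          have hgd : (parityAux s 0).getD p 1 = bsRun s p % 2 := parity_getD s p hpn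
          simp only [bPred, hgd]
          simp [hevp]
      have hcut := find?_range'_cut (bPred s t) (p + 1 - k) k (s.length + 1 - t.length - k) (by omega) hfail
      have h1 : k + (p + 1 - k) = p + 1 := by omega
      have h2 : s.length + 1 - t.length - k - (p + 1 - k) = s.length + 1 - t.length - (p+1) := by omega
      rw [h1, h2] at hcut
      rw [bFwd, bFwd, hcut]

-- the reverse main induction (nonempty target)
theorem revLoop (s t : List Char) (hm : 1 ≤ t.length) :
    ∀ (fuel : Nat) (e : Nat), e ≤ s.length →
      (∃ i, i + t.length ≤ e ∧ t <+: s.drop i ∧ bsRun s i % 2 = 0 ∧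
        ∀ j, i < j → j ≤ s.length → t <+: s.drop j → j + t.length ≤ e →
          (bsRun s j % 2 = 1 ∧ i + t.length ≤ j)) →
      e < fuel →
      fuLoop fuel s t (e : Int) true = bRev s t e := by
  intro fuel
  induction fuel with
  | zero => intro e he hex hf; omega
  | succ fuel ih =>
    intro e he hex hf
    obtain ⟨i0, hfit, hocc0, hev0, hmax0⟩ := hex
    rw [fuLoop]
    simp only [Bool.not_true, Bool.false_eq_true, if_false]
    rw [slice_to_clamp]
    have hce : PySem.List.clampIdx s.length ((e : Nat) : Int) = e := by
      unfold PySem.List.clampIdx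
      rw [if_neg (by omega)]
      simp
      omega
    rw [hce]
    rw [PySem.Chars.rfind]
    have hlen : (s.take e).length = e := by simp [he]
    rw [hlen, rfind_go_eq]
    have hbridge : ∀ j, j ≤ e →
        (t.isPrefixOf ((s.take e).drop j) = true ↔ (t <+: s.drop j ∧ j + t.length ≤ e)) := by
      intro j hj
      rw [List.isPrefixOf_iff_prefix, List.drop_take, List.prefix_take_iff]
      constructor
      · rintro ⟨h1, h2⟩; exact ⟨h1, by omega⟩
      · rintro ⟨h1, h2⟩; exact ⟨h1, by omega⟩
    cases hfq : (List.range' 0 (e+1)).reverse.find? (fun i => t.isPrefixOf ((s.take e).drop i)) with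
    | none =>
      exfalso
      have hp0 : t.isPrefixOf ((s.take e).drop i0) = true := (hbridge i0 (by omega)).mpr ⟨hocc0, hfit⟩
      have hmem : i0 ∈ (List.range' 0 (e+1)).reverse := by
        simp [List.mem_range']
        omega
      have := List.find?_eq_none.mp hfq i0 hmem
      simp_all
    | some p =>
      obtain ⟨hpc, hppred, hpmax⟩ := of_find?_rev_range' _ (e+1) p hfq
      have hple : p ≤ e := by omega
      obtain ⟨hpocc, hpfit⟩ := (hbridge p hple).mp hppred
      have hpn : p ≤ s.length := by omega
      dsimp only
      rw [if_neg (show ¬((p : Nat) : Int) = -1 from by omega)]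
      rw [cpb_eq s p hpn]
      have hgdp := parity_getD s p hpn
      have hpi0 : i0 ≤ p := by
        by_contra hcon
        push_neg at hcon
        have h1 : t.isPrefixOf ((s.take e).drop i0) = true := (hbridge i0 (by omega)).mpr ⟨hocc0, hfit⟩
        have := hpmax i0 (by omega) (by omega)
        simp_all
      by_cases hevp : bsRun s p % 2 = 0
      · rw [if_neg (show ¬((bsRun s p : Int) % 2 ≠ 0) from by omega)]
        have hs1 : PySem.Chars.startswith (s.drop p) t = true := (PySem.Chars.startswith_iff _ _).mpr hpocc
        have hptrue : bPred s t p = true := by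
          simp only [bPred, hs1, Bool.true_and, hgdp, hevp]
          rfl
        have hfailHigh : ∀ j, p < j → j < e + 1 - t.length → bPred s t j = false := by
          intro j h1 h2
          have hf2 := hpmax j h1 (by omega)
          have hnocc : ¬ t <+: s.drop j := by
            intro hc
            rw [(hbridge j (by omega)).mpr ⟨hc, by omega⟩] at hf2
            simp at hf2
          have hsw : PySem.Chars.startswith (s.drop j) t = false := by
            rw [← Bool.not_eq_true, PySem.Chars.startswith_iff]
            exact hnocc
          simp [bPred, hsw]
        have hsome := find?_rev_range'_some (bPred s t) (e+1-t.length) p (by omega) hptrue hfailHigh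
        rw [bRev, hsome]
      · have hpi0' : i0 < p := by
          rcases Nat.lt_or_ge i0 p with h | h
          · exact h
          · exfalso
            have : i0 = p := by omega
            rw [this] at hev0
            omega
        obtain ⟨hodd, hfitp⟩ := hmax0 p hpi0' hpn hpocc hpfit
        rw [if_pos (show ((bsRun s p : Int) % 2 ≠ 0) from by omega)]
        have hex' : ∃ i, i + t.length ≤ p ∧ t <+: s.drop i ∧ bsRun s i % 2 = 0 ∧
            ∀ j, i < j → j ≤ s.length → t <+: s.drop j → j + t.length ≤ p →
              (bsRun s j % 2 = 1 ∧ i + t.length ≤ j) :=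
          ⟨i0, hfitp, hocc0, hev0, fun j h1 h2 h3 h4 => hmax0 j h1 h2 h3 (by omega)⟩
        rw [ih p (by omega) hex' (by omega)]
        have hfailCut : ∀ j, p + 1 - t.length ≤ j → j < e + 1 - t.length → bPred s t j = false := by
          intro j h1 h2
          by_cases hoccj : t <+: s.drop j
          · have hji : i0 < j := by omega
            have hoddj := (hmax0 j hji (by omega) hoccj (by omega)).1
            simp only [bPred, parity_getD s j (by omega)]
            simp [hoddj]
          · have hsw : PySem.Chars.startswith (s.drop j) t = false := by
              rw [← Bool.not_eq_true, PySem.Chars.startswith_iff]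
              exact hoccj
            simp [bPred, hsw]
        have hcut := find?_rev_range'_cut (bPred s t) (e+1-t.length) (p+1-t.length) (by omega) hfailCut
        rw [bRev, bRev, hcut]

theorem fuLoop_fwd_norm (s t : List Char) (fuel : Nat) (offset : Int) :
    fuLoop (fuel+1) s t offset false
      = fuLoop (fuel+1) s t (((if offset < 0 then (offset + s.length).toNat else offset.toNat) : Nat) : Int) false := by
  rw [fuLoop, fuLoop]
  simp only [Bool.not_false, if_true]
  rw [findFrom_clamp]

theorem clampIdx_idem (n : Nat) (offset : Int) :
    PySem.List.clampIdx n ((PySem.List.clampIdx n offset : Nat) : Int) = PySem.List.clampIdx n offset := by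
  rw [PySem.List.clampIdx_natCast]
  exact min_eq_left (PySem.List.clampIdx_le n offset)

theorem fuLoop_rev_norm (s t : List Char) (fuel : Nat) (offset : Int) :
    fuLoop (fuel+1) s t offset true
      = fuLoop (fuel+1) s t ((PySem.List.clampIdx s.length offset : Nat) : Int) true := by
  rw [fuLoop, fuLoop]
  simp only [Bool.not_true, Bool.false_eq_true, if_false]
  rw [slice_to_clamp, slice_to_clamp, clampIdx_idem]

-- ===== VERDICT (by name: the statement is the Claim_ definition above) =====
theorem find_unescaped_spec : Claim_equal_find_unescaped := by
  intro text target offset reverse _hdom hpre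
  unfold Spec_find_unescaped find_unescaped find_unescaped_alt
  unfold Pre_find_unescaped at hpre
  dsimp only at hpre ⊢
  cases reverse with
  | false =>
    simp only [Bool.false_eq_true, if_false] at hpre ⊢
    obtain ⟨i0, hi0mem, hki, hfit, hp, hev⟩ := hpre
    have hi0n : i0 ≤ text.toList.length := by
      simp [List.mem_range] at hi0mem
      omega
    have hstart : (max (if offset < 0 then offset + (text.toList.length : Int) else offset) 0).toNat
        = (if offset < 0 then (offset + text.toList.length).toNat else offset.toNat) := by
      split_ifs <;> omega
    rw [hstart]
    have hlen2 : text.toList.length + 2 = (text.toList.length + 1) + 1 := by omega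
    rw [hlen2, fuLoop_fwd_norm]
    exact fwdLoop text.toList target.toList ((text.toList.length + 1) + 1)
      (if offset < 0 then (offset + text.toList.length).toNat else offset.toNat)
      ⟨i0, hki, hfit, hp, hev⟩ (by omega)
  | true =>
    simp only [if_true] at hpre ⊢
    have hlen2 : text.toList.length + 2 = (text.toList.length + 1) + 1 := by omega
    have hBe : (min (max (if offset < 0 then offset + (text.toList.length : Int) else offset) 0) (text.toList.length : Int)).toNat
        = PySem.List.clampIdx text.toList.length offset := by
      unfold PySem.List.clampIdx
      split_ifs <;> omega
    rw [hBe, hlen2, fuLoop_rev_norm]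
    set s := text.toList with hs
    set t := target.toList with ht
    set e := PySem.List.clampIdx s.length offset with he
    have hen : e ≤ s.length := PySem.List.clampIdx_le _ _
    by_cases hm : t.length = 0
    · -- empty target: one step, both return e
      rw [if_pos hm] at hpre
      have htnil : t = [] := List.length_eq_zero_iff.mp hm
      rw [fuLoop]
      simp only [Bool.not_true, Bool.false_eq_true, if_false]
      rw [slice_to_clamp, clampIdx_idem, ← he]
      rw [PySem.Chars.rfind]
      have hlen : (s.take e).length = e := by simp [hen]
      rw [hlen, rfind_go_eq]
      have hsomeA : (List.range' 0 (e+1)).reverse.find? (fun i => t.isPrefixOf ((s.take e).drop i)) = some e := by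
        apply find?_rev_range'_some _ (e+1) e (by omega) _ (by omega)
        simp [htnil]
      rw [hsomeA]
      dsimp only
      rw [if_neg (show ¬((e : Nat) : Int) = -1 from by omega)]
      rw [cpb_eq s e hen]
      rw [if_neg (show ¬((bsRun s e : Int) % 2 ≠ 0) from by omega)]
      have hsomeB : (List.range' 0 (e + 1 - t.length)).reverse.find? (bPred s t) = some e := by
        apply find?_rev_range'_some _ (e + 1 - t.length) e (by omega) _ (by omega)
        have hsw : PySem.Chars.startswith (s.drop e) t = true := by
          rw [PySem.Chars.startswith_iff, htnil]
          exact List.nil_prefix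
        simp only [bPred, hsw, Bool.true_and, parity_getD s e hen, hpre]
        rfl
      rw [bRev, hsomeB]
    · rw [if_neg hm] at hpre
      obtain ⟨i0, hi0mem, hfit, hp, hev, hmax⟩ := hpre
      apply revLoop s t (by omega) ((s.length + 1) + 1) e hen
      · refine ⟨i0, hfit, hp, hev, ?_⟩
        intro j h1 h2 h3 h4
        have hjmem : j ∈ List.range (s.length + 1) := by
          simp [List.mem_range]
          omega
        exact hmax j hjmem h1 h3 h4
      · omega
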